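-- pv_equiv track=rewrite | github.com/nyxtrydev/tribe_bug_tester | migrate_paths.py | fix_paths
-- ===== SOURCE A (Python) =====
-- def fix_paths(s):
--     if not s or '|' in s:
--         return s
--
--     parts = s.split(',')
--     new_paths = []
--     current_path = ""
--
--     for p in parts:
--         # p = p.strip() # Don't strip yet, we might need leading space if we re-join
--         # actually, splitting by comma usually implies we want to strip the space after comma if it was "a, b"
--         # but here the split was inside a filename "Image, 2026". " 2026".
--         # If we strip, " 2026" becomes "2026".
--         # If we re-join "Image" + ", " + "2026", we get "Image, 2026".
--
--         clean_p = p.strip()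
--
--         # Check if this part looks like a start of a new path
--         # Our paths always start with "app/uploads" or "app\uploads"
--         if clean_p.startswith("app/uploads") or clean_p.startswith("app\\uploads"):
--             if current_path:
--                 new_paths.append(current_path)
--             current_path = clean_p # Use the clean version for start
--         else:
--             # Continuation
--             if current_path:
--                 current_path += "," + p # Keep original p to preserve spacing if possible?
--                 # actually p has the leading space from the split if it was there.
--             else:
--                 # Should not happen if first char is valid, but if bad data
--                 current_path = clean_p
--
--     if current_path:
--         new_paths.append(current_path)
--
--     return "|".join(new_paths)
-- ===== SOURCE B (Python) =====
-- def _is_start(cp):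
--     return cp.startswith('app/uploads') or cp.startswith('app\\uploads')
--
--
-- def _paths(parts):
--     # skip leading parts that neither start a path nor have any content
--     while parts and not _is_start(parts[0].strip()) and not parts[0].strip():
--         parts = parts[1:]
--     if not parts:
--         return []
--     head, rest = parts[0], parts[1:]
--     k = 0
--     while k < len(rest) and not _is_start(rest[k].strip()):
--         k += 1
--     return [head.strip() + ''.join(',' + q for q in rest[:k])] + _paths(rest[k:])
--
--
-- def fix_paths(s):
--     if not s or '|' in s:
--         return s
--     return '|'.join(_paths(s.split(',')))
-- ===== Notes on version B (the rewrite author's own statement) =====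
-- stated objective: alternative
-- what changed: A folds once over the comma-split parts with a (paths, current-string) accumulator; B instead recursively peels off one complete path per step: skip leading contentless parts, take the maximal run of continuation parts after the head, format that path, and recurse on the remaining suffix.
import Mathlib
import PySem

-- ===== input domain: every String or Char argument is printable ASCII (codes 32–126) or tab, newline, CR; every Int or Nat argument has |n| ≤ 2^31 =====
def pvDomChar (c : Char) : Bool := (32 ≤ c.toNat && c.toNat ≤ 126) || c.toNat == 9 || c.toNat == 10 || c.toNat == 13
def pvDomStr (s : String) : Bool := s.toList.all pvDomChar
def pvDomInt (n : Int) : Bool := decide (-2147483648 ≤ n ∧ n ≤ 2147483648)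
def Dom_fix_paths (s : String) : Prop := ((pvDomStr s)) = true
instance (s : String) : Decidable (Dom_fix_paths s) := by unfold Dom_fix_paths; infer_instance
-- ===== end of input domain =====

-- B replaces A's single accumulating fold by a recursion that extracts one complete path
-- per step (skip contentless prefix, take the continuation run, recurse on the rest) —
-- same values (objective: alternative decomposition, not faster).

-- ===== PORT A =====
-- the test 'clean_p.startswith("app/uploads") or clean_p.startswith("app\\uploads")' (both pythons)
def pvIsStart (cp : String) : Bool :=
  PySem.Str.startswith cp "app/uploads" || PySem.Str.startswith cp "app\\uploads"

-- loop body of A: state = (new_paths, current_path)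
def pvAStep (st : List String × String) (p : String) : List String × String :=
  let clean := PySem.Str.strip p
  if pvIsStart clean then
    (if st.2 ≠ "" then st.1 ++ [st.2] else st.1, clean)
  else if st.2 ≠ "" then (st.1, st.2 ++ "," ++ p)
  else (st.1, clean)

def fix_paths (s : String) : String :=
  if s = "" ∨ PySem.Str.isIn "|" s = true then s
  else
    let parts := (PySem.Str.split? s ",").getD []
    let st := parts.foldl pvAStep ([], "")
    PySem.Str.join "|" (if st.2 ≠ "" then st.1 ++ [st.2] else st.1)

-- ===== PORT B =====
-- B's skip test: part neither starts a path nor has content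
def pvSkip (p : String) : Bool := !pvIsStart (PySem.Str.strip p) && PySem.Str.strip p == ""
-- B's continuation test
def pvCont (q : String) : Bool := !pvIsStart (PySem.Str.strip q)

-- B's recursive helper _paths: the two while loops are dropWhile/takeWhile scans
def pvPaths (parts : List String) : List String :=
  match _h : parts.dropWhile pvSkip with
  | [] => []
  | p :: rest =>
    (PySem.Str.strip p ++
        PySem.Str.join "" ((rest.takeWhile pvCont).map (fun q => "," ++ q)))
      :: pvPaths (rest.dropWhile pvCont)
termination_by parts.length
decreasing_by
  have h1 : (parts.dropWhile pvSkip).length ≤ parts.length := parts.length_dropWhile_le pvSkip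
  rw [_h] at h1
  have h2 : (rest.dropWhile pvCont).length ≤ rest.length := rest.length_dropWhile_le pvCont
  simp at h1
  omega

def fix_paths_alt (s : String) : String :=
  if s = "" ∨ PySem.Str.isIn "|" s = true then s
  else PySem.Str.join "|" (pvPaths ((PySem.Str.split? s ",").getD []))

-- ===== PRECONDITION & SPEC =====
def Spec_fix_paths (s : String) (out : String) : Prop := out = fix_paths_alt s
instance (s : String) (out : String) : Decidable (Spec_fix_paths s out) := by unfold Spec_fix_paths; infer_instance

-- ===== CLAIM (what is proved, stated in full; the proofs are below) =====
def Claim_equal_fix_paths : Prop := ∀ (s : String), Dom_fix_paths s → Spec_fix_paths s (fix_paths s)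

-- ===== LEMMAS AND PROOFS =====

-- A's closing step 'if current_path: new_paths.append(current_path)'
def pvFinish (st : List String × String) : List String :=
  if st.2 ≠ "" then st.1 ++ [st.2] else st.1

theorem pvJoinNil_cons (x : List Char) (l : List (List Char)) :
    PySem.Chars.join [] (x :: l) = x ++ PySem.Chars.join [] l := by
  cases l with
  | nil => simp [PySem.Chars.join_singleton, PySem.Chars.join_nil]
  | cons b r => rw [PySem.Chars.join_cons_cons]; simp

theorem pvStrJoinNil_cons (x : String) (l : List String) :
    PySem.Str.join "" (x :: l) = x ++ PySem.Str.join "" l := by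
  apply String.toList_inj.mp
  simp [PySem.Str.toList_join, pvJoinNil_cons]

theorem pvStartswith_ne_empty (c p : String) (hp : p ≠ "")
    (h : PySem.Str.startswith c p = true) : c ≠ "" := by
  have hpre := (PySem.Chars.startswith_iff c.toList p.toList).mp (by simpa using h)
  intro hc; subst hc
  simp only [String.toList_empty, List.prefix_nil] at hpre
  exact hp (String.toList_inj.mp (by simp [hpre]))

theorem pvIsStart_ne_empty (c : String) (h : pvIsStart c = true) : c ≠ "" := by
  rcases Bool.or_eq_true_iff.mp h with h | h
  · exact pvStartswith_ne_empty _ _ (by decide) h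
  · exact pvStartswith_ne_empty _ _ (by decide) h

theorem pvAppend_ne_empty (a c : String) : a ++ "," ++ c ≠ "" := by
  intro h
  have := congrArg String.toList h
  simp at this

-- unfolding pvPaths: a contentless head is skipped
theorem pvPaths_skip (p : String) (rest : List String) (hp : pvSkip p = true) :
    pvPaths (p :: rest) = pvPaths rest := by
  conv_lhs => rw [pvPaths]
  rw [List.dropWhile_cons_of_pos hp]
  conv_rhs => rw [pvPaths]

-- unfolding pvPaths: an unskipped head starts a path
theorem pvPaths_cons (p : String) (rest : List String) (hp : pvSkip p = false) :
    pvPaths (p :: rest) =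
      (PySem.Str.strip p ++
          PySem.Str.join "" ((rest.takeWhile pvCont).map (fun q => "," ++ q)))
        :: pvPaths (rest.dropWhile pvCont) := by
  conv_lhs => rw [pvPaths]
  rw [List.dropWhile_cons_of_neg (by simp [hp])]

-- A's fold started with a nonempty current path produces that path (extended by the
-- continuation run) followed by B's paths of the remaining suffix
theorem pvFoldl_cont (parts : List String) (acc : List String) (cur : String)
    (hc : cur ≠ "") :
    pvFinish (parts.foldl pvAStep (acc, cur)) =
      acc ++ (cur ++ PySem.Str.join "" ((parts.takeWhile pvCont).map (fun q => "," ++ q)))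
        :: pvPaths (parts.dropWhile pvCont) := by
  induction parts generalizing acc cur with
  | nil =>
    simp [pvFinish, hc, pvPaths, PySem.Str.join, PySem.Chars.join_nil]
  | cons p rest ih =>
    by_cases hs : pvIsStart (PySem.Str.strip p) = true
    · have hcont : pvCont p = false := by simp [pvCont, hs]
      have hskip : pvSkip p = false := by simp [pvSkip, hs]
      rw [List.foldl_cons, show pvAStep (acc, cur) p = (acc ++ [cur], PySem.Str.strip p) by
        simp [pvAStep, hs, hc]]
      rw [ih _ _ (pvIsStart_ne_empty _ hs)]
      simp only [List.takeWhile_cons, List.dropWhile_cons, hcont, Bool.false_eq_true,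
        reduceIte, List.map_nil]
      rw [pvPaths_cons p rest hskip]
      simp [PySem.Str.join, PySem.Chars.join_nil]
    · have hcont : pvCont p = true := by simp [pvCont, hs]
      rw [List.foldl_cons, show pvAStep (acc, cur) p = (acc, cur ++ "," ++ p) by
        simp [pvAStep, hs, hc]]
      rw [ih _ _ (pvAppend_ne_empty _ _)]
      simp only [List.takeWhile_cons, List.dropWhile_cons, hcont, if_pos, List.map_cons]
      rw [pvStrJoinNil_cons]
      apply congrArg (acc ++ ·)
      apply congrArg (· :: pvPaths (rest.dropWhile pvCont))
      apply String.toList_inj.mp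
      simp

-- A's fold started with an empty current path produces exactly B's paths
theorem pvFoldl_empty (parts : List String) (acc : List String) :
    pvFinish (parts.foldl pvAStep (acc, "")) = acc ++ pvPaths parts := by
  induction parts generalizing acc with
  | nil => simp [pvFinish, pvPaths]
  | cons p rest ih =>
    by_cases hs : pvIsStart (PySem.Str.strip p) = true
    · have hskip : pvSkip p = false := by simp [pvSkip, hs]
      rw [List.foldl_cons, show pvAStep (acc, "") p = (acc, PySem.Str.strip p) by
        simp [pvAStep, hs]]
      rw [pvFoldl_cont rest acc _ (pvIsStart_ne_empty _ hs), pvPaths_cons p rest hskip]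
    · by_cases he : PySem.Str.strip p = ""
      · have hskip : pvSkip p = true := by simp [pvSkip, he]; decide
        rw [List.foldl_cons, show pvAStep (acc, "") p = (acc, "") by
          simp [pvAStep, he]]
        rw [ih, pvPaths_skip p rest hskip]
      · have hskip : pvSkip p = false := by simp [pvSkip, he]
        rw [List.foldl_cons, show pvAStep (acc, "") p = (acc, PySem.Str.strip p) by
          simp [pvAStep, hs]]
        rw [pvFoldl_cont rest acc _ he, pvPaths_cons p rest hskip]

-- ===== VERDICT (by name: the statement is the Claim_ definition above) =====
theorem fix_paths_spec : Claim_equal_fix_paths := by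
  intro s _
  unfold Spec_fix_paths fix_paths fix_paths_alt
  split_ifs with hg
  · rfl
  · exact congrArg (PySem.Str.join "|")
      (by simpa [pvFinish] using pvFoldl_empty ((PySem.Str.split? s ",").getD []) [])
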